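-- pv_equiv track=rewrite | github.com/daniel-reich/ubiquitous-fiesta | 9Px2rkc9TPhK54wDb_7.py | ecg_seq_index
-- ===== SOURCE A (Python) =====
-- def ecg_seq_index(n):
--     result = [1, 2]
--     num = 1
--     fac = [x for x in range(2, result[-1] + 1) if result[-1] % x == 0]
--     while result[-1] != n:
--         num += 1
--
--         if num not in result:
--             fac_num = [x for x in range(2, num + 1) if num % x == 0]
--             if list(set(fac).intersection(fac_num)):
--                 result.append(num)
--                 fac = fac_num
--                 num = 1
--     return len(result) - 1
-- ===== SOURCE B (Python) =====
-- def _gcd(a, b):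
--     while b:
--         a, b = b, a % b
--     return a
--
--
-- def ecg_seq_index(n):
--     # set membership + Euclid's gcd instead of factor lists and intersections
--     used = {1, 2}
--     last, count, m = 2, 1, 2
--     while last != n:
--         if m not in used and _gcd(m, last) != 1:
--             used.add(m)
--             last = m
--             count += 1
--             m = 2
--         else:
--             m += 1
--     return count
-- ===== Notes on version B (the rewrite author's own statement) =====
-- stated objective: faster
-- what changed: B builds the EKG/ECG sequence with a set of used values and Euclid's gcd test for sharing a factor (plus an incremental index counter), instead of A's list-membership scans and trial-division factor lists intersected per candidate.
import Mathlib
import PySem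

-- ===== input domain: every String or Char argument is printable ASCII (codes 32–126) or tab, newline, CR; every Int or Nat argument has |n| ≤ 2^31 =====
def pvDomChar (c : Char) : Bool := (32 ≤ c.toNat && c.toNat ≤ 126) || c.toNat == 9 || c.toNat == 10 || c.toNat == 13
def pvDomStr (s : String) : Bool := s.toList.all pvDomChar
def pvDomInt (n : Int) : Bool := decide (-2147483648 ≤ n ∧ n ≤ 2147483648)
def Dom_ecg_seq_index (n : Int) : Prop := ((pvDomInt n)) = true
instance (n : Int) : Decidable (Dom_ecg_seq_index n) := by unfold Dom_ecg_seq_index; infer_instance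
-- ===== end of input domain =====

-- B replaces A's per-candidate trial-division factor lists and set intersection by a
-- Euclid-gcd coprimality test, and A's list membership / final len() by a set of used
-- values with an incremental counter (faster; a timing run measures the speed-up).
-- Both loops carry a fuel parameter as a pure totality guard (Python's while loop);
-- both ports use the same ample fuel, and the equivalence is proved for every fuel.

-- ===== PORT A =====
-- [x for x in range(2, m + 1) if m % x == 0]
def pyFacs (m : Int) : List Int :=
  (PySem.List.pyRange 2 (m + 1) 1).filter (fun x => PySem.Int.mod m x == 0)

-- the while loop of A; fuel is only a totality guard (result is always nonempty, so
-- result[-1] = (pyGet? result (-1)).getD 0 is exact)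
def ecgLoopA (n : Int) : Nat → List Int → Int → List Int → Int
  | 0, result, _, _ => (result.length : Int) - 1
  | fuel + 1, result, num, fac =>
    if (PySem.List.pyGet? result (-1)).getD 0 ≠ n then
      let num' := num + 1
      if num' ∉ result then
        let facNum := pyFacs num'
        if PySem.Set.inter (PySem.Set.ofList fac) facNum ≠ [] then
          ecgLoopA n fuel (result ++ [num']) 1 facNum
        else ecgLoopA n fuel result num' fac
      else ecgLoopA n fuel result num' fac
    else (result.length : Int) - 1

def ecgFuel (n : Int) : Nat := (n.toNat + 4) ^ 3

def ecg_seq_index (n : Int) : Int :=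
  ecgLoopA n (ecgFuel n) [1, 2] 1 (pyFacs ((PySem.List.pyGet? [(1 : Int), 2] (-1)).getD 0))

-- ===== PORT B =====
-- _gcd: while b: a, b = b, a % b  (fuel b.natAbs + 1 always suffices for 0 ≤ b)
def euclidGcd : Nat → Int → Int → Int
  | 0, a, _ => a
  | fuel + 1, a, b => if b ≠ 0 then euclidGcd fuel b (PySem.Int.mod a b) else a

def gcdB (a b : Int) : Int := euclidGcd (b.natAbs + 1) a b

-- the while loop of B, one candidate test per fuel step
def ecgLoopB (n : Int) : Nat → PySem.Set Int → Int → Int → Int → Int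
  | 0, _, _, count, _ => count
  | fuel + 1, used, last, count, m =>
    if last ≠ n then
      if m ∉ used ∧ gcdB m last ≠ 1 then
        ecgLoopB n fuel (PySem.Set.add used m) m (count + 1) 2
      else
        ecgLoopB n fuel used last count (m + 1)
    else count

def ecg_seq_index_alt (n : Int) : Int :=
  ecgLoopB n (ecgFuel n) (PySem.Set.ofList [1, 2]) 2 1 2

-- ===== PRECONDITION & SPEC =====
def Spec_ecg_seq_index (n : Int) (out : Int) : Prop := out = ecg_seq_index_alt n
instance (n : Int) (out : Int) : Decidable (Spec_ecg_seq_index n out) := by unfold Spec_ecg_seq_index; infer_instance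

-- ===== CLAIM (what is proved, stated in full; the proofs are below) =====
def Claim_equal_ecg_seq_index : Prop := ∀ (n : Int), Dom_ecg_seq_index n → Spec_ecg_seq_index n (ecg_seq_index n)

-- ===== LEMMAS AND PROOFS =====

lemma mem_pyFacs {x m : Int} : x ∈ pyFacs m ↔ (2 ≤ x ∧ x ≤ m ∧ x ∣ m) := by
  simp [pyFacs, PySem.List.mem_pyRange_one, PySem.Int.mod_eq_zero_iff_dvd]
  tauto

lemma euclidGcd_eq (fuel : Nat) (a b : Int) (ha : 0 ≤ a) (hb : 0 ≤ b)
    (hf : b.natAbs < fuel) : euclidGcd fuel a b = (Int.gcd a b : Int) := by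
  induction fuel generalizing a b with
  | zero => omega
  | succ f ih =>
    by_cases h0 : b = 0
    · simp [euclidGcd, h0, Int.gcd, Int.natAbs_of_nonneg ha]
    · have hbpos : 0 < b := lt_of_le_of_ne hb (Ne.symm h0)
      have hmod : PySem.Int.mod a b = a % b := PySem.Int.mod_eq_emod_of_pos (a := a) hbpos
      have hr0 : 0 ≤ a % b := Int.emod_nonneg a h0
      have hrb : a % b < b := Int.emod_lt_of_pos a hbpos
      have : euclidGcd (f + 1) a b = euclidGcd f b (a % b) := by
        simp [euclidGcd, h0, hmod]
      rw [this, ih b (a % b) hb hr0 (by omega)]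
      congr 1
      rw [Int.gcd_comm b (a % b), Int.gcd_emod a b]

lemma gcdB_eq (a b : Int) (ha : 0 ≤ a) (hb : 0 ≤ b) : gcdB a b = (Int.gcd a b : Int) := by
  exact euclidGcd_eq _ a b ha hb (by omega)

lemma inter_facs_iff (last m : Int) (hl : 2 ≤ last) (hm : 2 ≤ m) :
    PySem.Set.inter (PySem.Set.ofList (pyFacs last)) (pyFacs m) ≠ [] ↔ (Int.gcd m last : Int) ≠ 1 := by
  rw [Ne, List.eq_nil_iff_forall_not_mem]
  push Not
  constructor
  · rintro ⟨x, hx⟩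
    obtain ⟨hxl, hxm⟩ := (PySem.Set.mem_inter _ _ _).mp hx
    rw [PySem.Set.mem_ofList] at hxl
    obtain ⟨hx2, _, hxdl⟩ := mem_pyFacs.mp hxl
    obtain ⟨_, _, hxdm⟩ := mem_pyFacs.mp hxm
    intro h1
    have : x ∣ (Int.gcd m last : Int) := Int.dvd_coe_gcd hxdm hxdl
    rw [h1] at this
    have := Int.le_of_dvd (by norm_num) this
    omega
  · intro hg
    have hg0 : 0 < Int.gcd m last := Int.gcd_pos_of_ne_zero_left last (by omega)
    have hg2 : 2 ≤ (Int.gcd m last : Int) := by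
      have h1 : Int.gcd m last ≠ 1 := by
        intro h; exact hg (by exact_mod_cast congrArg (fun k : Nat => (k : Int)) h)
      omega
    refine ⟨(Int.gcd m last : Int), (PySem.Set.mem_inter _ _ _).mpr ⟨?_, ?_⟩⟩
    · rw [PySem.Set.mem_ofList]
      exact mem_pyFacs.mpr ⟨hg2, Int.le_of_dvd (by omega) (Int.gcd_dvd_right m last),
        Int.gcd_dvd_right m last⟩
    · exact mem_pyFacs.mpr ⟨hg2, Int.le_of_dvd (by omega) (Int.gcd_dvd_left m last),
        Int.gcd_dvd_left m last⟩

lemma loop_eq (n : Int) (fuel : Nat) :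
    ∀ (result : List Int) (num : Int) (used : PySem.Set Int) (count m : Int)
      (hres : result ≠ [])
      (hlast : 2 ≤ result.getLast hres)
      (hused : ∀ x : Int, x ∈ used ↔ x ∈ result)
      (hcount : count = (result.length : Int) - 1)
      (hm : m = num + 1) (hnum : 1 ≤ num),
      ecgLoopA n fuel result num (pyFacs (result.getLast hres)) =
        ecgLoopB n fuel used (result.getLast hres) count m := by
  induction fuel with
  | zero =>
    intro result num used count m hres hlast hused hcount hm hnum
    simp [ecgLoopA, ecgLoopB, hcount]
  | succ f ih =>
    intro result num used count m hres hlast hused hcount hm hnum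
    subst hm hcount
    have hget : (PySem.List.pyGet? result (-1)).getD 0 = result.getLast hres := by
      rw [PySem.List.pyGet?_neg_one, List.getLast?_eq_some_getLast hres]; rfl
    by_cases hn : result.getLast hres = n
    · simp [ecgLoopA, ecgLoopB, hget, hn]
    · by_cases hin : num + 1 ∈ result
      · have hinu : num + 1 ∈ used := (hused _).mpr hin
        have hBc : ¬(num + 1 ∉ used ∧ gcdB (num + 1) (result.getLast hres) ≠ 1) := by
          rintro ⟨h1, -⟩; exact h1 hinu
        simp only [ecgLoopA, ecgLoopB, hget, if_pos hn, if_neg (not_not_intro hin),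
          if_neg hBc]
        exact ih result (num + 1) used _ (num + 1 + 1) hres hlast hused rfl rfl (by omega)
      · have hinu : num + 1 ∉ used := fun h => hin ((hused _).mp h)
        have hg : gcdB (num + 1) (result.getLast hres) =
            (Int.gcd (num + 1) (result.getLast hres) : Int) :=
          gcdB_eq _ _ (by omega) (by omega)
        by_cases hc : (Int.gcd (num + 1) (result.getLast hres) : Int) = 1
        · -- coprime: both skip the candidate
          have hBc : ¬(num + 1 ∉ used ∧ gcdB (num + 1) (result.getLast hres) ≠ 1) := by
            rintro ⟨-, h2⟩; exact h2 (hg.trans hc)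
          simp only [ecgLoopA, ecgLoopB, hget, if_pos hn, if_pos hin,
            if_neg ((not_congr (inter_facs_iff _ _ hlast (by omega))).mpr (not_not_intro hc)),
            if_neg hBc]
          exact ih result (num + 1) used _ (num + 1 + 1) hres hlast hused rfl rfl (by omega)
        · -- shared factor: both append the candidate
          have hiter : PySem.Set.inter (PySem.Set.ofList (pyFacs (result.getLast hres)))
              (pyFacs (num + 1)) ≠ [] :=
            (inter_facs_iff _ _ hlast (by omega)).mpr hc
          simp only [ecgLoopA, ecgLoopB, hget, if_pos hn, if_pos hin, if_pos hiter,
            if_pos (show num + 1 ∉ used ∧ gcdB (num + 1) (result.getLast hres) ≠ 1 from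
              ⟨hinu, by rw [hg]; exact hc⟩)]
          have hres' : result ++ [num + 1] ≠ [] := by simp
          have hlast' : (result ++ [num + 1]).getLast hres' = num + 1 := List.getLast_concat
          have := ih (result ++ [num + 1]) 1 (PySem.Set.add used (num + 1))
            ((result.length : Int) - 1 + 1) 2 hres'
            (by rw [hlast']; omega)
            (by intro x
                simp only [PySem.Set.mem_add, hused, List.mem_append, List.mem_singleton])
            (by simp) rfl (by omega)
          rw [hlast'] at this
          exact this

-- ===== VERDICT (by name: the statement is the Claim_ definition above) =====
theorem ecg_seq_index_spec : Claim_equal_ecg_seq_index := by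
  intro n _
  unfold Spec_ecg_seq_index ecg_seq_index ecg_seq_index_alt
  have h := loop_eq n (ecgFuel n) [1, 2] 1 (PySem.Set.ofList [1, 2]) 1 2
    (by simp) (by simp) (by intro x; simp [PySem.Set.ofList]) (by simp) rfl (by omega)
  simpa using h
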